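-- pv_equiv track=rewrite | github.com/cirosantilli/project-euler-solvers | solvers/300.py | _add_slices
-- ===== SOURCE A (Python) =====
-- from typing import List
--
-- def _add_slices(A: List[int], B: List[int], bits: int) -> List[int]:
--     """Bit-sliced addition: C = A + B (per position), returning `bits` slices."""
--     carry = 0
--     res = [0] * bits
--     for k in range(bits):
--         ai = A[k] if k < len(A) else 0
--         bi = B[k] if k < len(B) else 0
--         res[k] = ai ^ bi ^ carry
--         carry = (ai & bi) | (ai & carry) | (bi & carry)
--     return res
-- ===== SOURCE B (Python) =====
-- from typing import List
--
--
-- def _sel(x: int, y: int, m: int) -> int: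
--     """Per-lane multiplexer: pick y's bit where m has a 1, else x's bit."""
--     return (x & ~m) | (y & m)
--
--
-- def _add_slices(A: List[int], B: List[int], bits: int) -> List[int]:
--     """Conditional-sum (carry-select) adder, divide and conquer on the bit range:
--     each half is computed for both carry-in 0 and carry-in ~0 (all lanes), then
--     the high half's answer is selected per lane by the low half's carry-out mask."""
--     def rec(lo: int, n: int):
--         # returns (res0, cout0, res1, cout1) for carry-in 0 and carry-in ~0
--         if n == 0:
--             return [], 0, [], -1
--         if n == 1:
--             a = A[lo] if lo < len(A) else 0
--             b = B[lo] if lo < len(B) else 0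
--             return [a ^ b], a & b, [a ^ b ^ -1], a | b
--         h = n // 2
--         l0, lc0, l1, lc1 = rec(lo, h)
--         h0, hc0, h1, hc1 = rec(lo + h, n - h)
--         r0 = l0 + [_sel(x, y, lc0) for x, y in zip(h0, h1)]
--         r1 = l1 + [_sel(x, y, lc1) for x, y in zip(h0, h1)]
--         return r0, _sel(hc0, hc1, lc0), r1, _sel(hc0, hc1, lc1)
--
--     res, _, _, _ = rec(0, max(bits, 0))
--     return res
-- ===== Notes on version B (the rewrite author's own statement) =====
-- stated objective: alternative
-- what changed: Replaces A's sequential ripple-carry loop (one pass threading a carry mask through the majority formula) by a divide-and-conquer conditional-sum (carry-select) adder: each half of the bit range is computed recursively for both carry-in 0 and carry-in ~0, and the high half's result and carry-out are selected per lane by the low half's carry-out mask via a bitwise multiplexer (x & ~m) | (y & m).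
import Mathlib
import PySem

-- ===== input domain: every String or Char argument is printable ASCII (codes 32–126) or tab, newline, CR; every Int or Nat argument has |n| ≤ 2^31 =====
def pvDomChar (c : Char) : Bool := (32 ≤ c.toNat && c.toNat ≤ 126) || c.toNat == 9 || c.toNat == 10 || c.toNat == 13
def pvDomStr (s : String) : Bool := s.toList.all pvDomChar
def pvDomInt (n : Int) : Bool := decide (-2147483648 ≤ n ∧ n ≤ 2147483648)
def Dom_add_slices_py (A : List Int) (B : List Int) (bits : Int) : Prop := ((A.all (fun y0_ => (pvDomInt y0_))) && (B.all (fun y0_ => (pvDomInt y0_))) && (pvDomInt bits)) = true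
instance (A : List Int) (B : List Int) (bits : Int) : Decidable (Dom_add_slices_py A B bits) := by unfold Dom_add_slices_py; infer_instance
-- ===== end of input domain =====

-- B replaces A's sequential ripple-carry loop by a divide-and-conquer
-- conditional-sum (carry-select) adder; objective: alternative (same task, different algorithm).

-- padded element access, `X[k] if k < len(X) else 0`, shared by both sources
def pvPad (X : List Int) (k : Int) : Int :=
  if k < (X.length : Int) then (PySem.List.pyGet? X k).getD 0 else 0

-- ===== PORT A =====
-- literal port of A: res = [0]*bits, then for k in range(bits):
--   res[k] = ai ^ bi ^ carry; carry = (ai & bi) | (ai & carry) | (bi & carry)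
def add_slices_py (A : List Int) (B : List Int) (bits : Int) : List Int :=
  let res0 : List Int := List.replicate bits.toNat 0
  let st := (PySem.List.pyRange 0 bits 1).foldl (fun (st : Int × List Int) k =>
      let ai := pvPad A k
      let bi := pvPad B k
      (PySem.Int.bor (PySem.Int.band ai bi)
        (PySem.Int.bor (PySem.Int.band ai st.1) (PySem.Int.band bi st.1)),
       st.2.set k.toNat (PySem.Int.bxor (PySem.Int.bxor ai bi) st.1)))
    (0, res0)
  st.2

-- ===== PORT B =====
-- literal port of Source B: _sel(x, y, m) = (x & ~m) | (y & m)  (Python ~m is Int.not m)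
def pvSel (x y m : Int) : Int :=
  PySem.Int.bor (PySem.Int.band x (Int.not m)) (PySem.Int.band y m)

-- literal port of Source B's rec(lo, n): (res0, cout0, res1, cout1) for carry-in 0 and ~0
def pvAddRec (A B : List Int) (lo n : Nat) : List Int × Int × List Int × Int :=
  if n = 0 then ([], 0, [], -1)
  else if n = 1 then
    ([PySem.Int.bxor (pvPad A lo) (pvPad B lo)],
     PySem.Int.band (pvPad A lo) (pvPad B lo),
     [PySem.Int.bxor (PySem.Int.bxor (pvPad A lo) (pvPad B lo)) (-1)],
     PySem.Int.bor (pvPad A lo) (pvPad B lo))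
  else
    match pvAddRec A B lo (n / 2), pvAddRec A B (lo + n / 2) (n - n / 2) with
    | (l0, lc0, l1, lc1), (h0, hc0, h1, hc1) =>
      (l0 ++ (h0.zip h1).map (fun xy => pvSel xy.1 xy.2 lc0),
       pvSel hc0 hc1 lc0,
       l1 ++ (h0.zip h1).map (fun xy => pvSel xy.1 xy.2 lc1),
       pvSel hc0 hc1 lc1)
termination_by n
decreasing_by all_goals omega

def add_slices_py_alt (A : List Int) (B : List Int) (bits : Int) : List Int :=
  (pvAddRec A B 0 (max bits 0).toNat).1

-- ===== PRECONDITION & SPEC =====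
def Spec_add_slices_py (A : List Int) (B : List Int) (bits : Int) (out : List Int) : Prop := out = add_slices_py_alt A B bits
instance (A : List Int) (B : List Int) (bits : Int) (out : List Int) : Decidable (Spec_add_slices_py A B bits out) := by unfold Spec_add_slices_py; infer_instance

-- ===== CLAIM (what is proved, stated in full; the proofs are below) =====
def Claim_equal_add_slices_py : Prop := ∀ (A : List Int) (B : List Int) (bits : Int), Dom_add_slices_py A B bits → Spec_add_slices_py A B bits (add_slices_py A B bits)

-- ===== LEMMAS AND PROOFS =====

theorem pv_mod2_and_iff (x y : Nat) : (x &&& y) % 2 = 1 ↔ (x % 2 = 1 ∧ y % 2 = 1) := by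
  have h := Nat.testBit_and x y 0
  simp only [Nat.testBit_zero] at h
  have := congrArg (· = true) h
  simpa using this

theorem pv_mod2_xor_iff (x y : Nat) : ((x ^^^ y) % 2 = 1) ↔ ¬(x % 2 = 1 ↔ y % 2 = 1) := by
  have h := Nat.testBit_xor x y 0
  simp only [Nat.testBit_zero] at h
  have := congrArg (· = true) h
  simp [decide_eq_true_eq] at this
  rcases Nat.mod_two_eq_zero_or_one x with hx | hx <;>
    rcases Nat.mod_two_eq_zero_or_one y with hy | hy <;>
      simp [hx, hy] at this ⊢ <;> omega

-- a & b is a bit-submask of a, so subtracting it equals xoring it away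
theorem pv_sub_and_eq_xor (x y : Nat) : x - (x &&& y) = x ^^^ (x &&& y) := by
  induction x using Nat.strong_induction_on generalizing y with
  | _ x ih =>
    rcases Nat.eq_zero_or_pos x with hx | hx
    · subst hx; simp
    · have ihh := ih (x / 2) (Nat.div_lt_self hx (by norm_num)) (y / 2)
      have hdiv : (x &&& y) / 2 = x / 2 &&& y / 2 := Nat.and_div_two
      have hxordiv : (x ^^^ (x &&& y)) / 2 = x / 2 ^^^ (x / 2 &&& y / 2) := by
        rw [Nat.xor_div_two, hdiv]
      have h1 := pv_mod2_and_iff x y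
      have h2 := pv_mod2_xor_iff x (x &&& y)
      have hle : x / 2 &&& y / 2 ≤ x / 2 := Nat.and_le_left
      have e1 : x = 2 * (x / 2) + x % 2 := by omega
      have e2 : (x &&& y) = 2 * (x / 2 &&& y / 2) + (x &&& y) % 2 := by
        rw [← hdiv]; omega
      have e3 : (x ^^^ (x &&& y)) = 2 * (x / 2 ^^^ (x / 2 &&& y / 2)) + (x ^^^ (x &&& y)) % 2 := by
        rw [← hxordiv]; omega
      omega

-- Python-style test bit of an arbitrary int (infinite two's complement view)
def pvTb (a : Int) (k : Nat) : Bool :=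
  if 0 ≤ a then a.toNat.testBit k else !((-a - 1).toNat.testBit k)

theorem pvTb_ofNat (n : Nat) (k : Nat) : pvTb (↑n) k = n.testBit k := by
  simp [pvTb]

theorem pvTb_negSucc (n : Nat) (k : Nat) : pvTb (-↑n - 1) k = !(n.testBit k) := by
  have h1 : ¬((0:Int) ≤ -↑n - 1) := by omega
  have h2 : (-(-(n:Int) - 1) - 1).toNat = n := by omega
  unfold pvTb
  rw [if_neg h1, h2]

theorem pvTb_pos (a : Int) (ha : 0 ≤ a) (k : Nat) : pvTb a k = a.toNat.testBit k := by
  simp [pvTb, ha]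

theorem pvTb_neg (a : Int) (ha : ¬(0 ≤ a)) (k : Nat) : pvTb a k = !((-a - 1).toNat.testBit k) := by
  simp [pvTb, ha]

theorem pvTb_zero (k : Nat) : pvTb 0 k = false := by
  rw [pvTb_pos 0 (le_refl 0)]; simp

theorem pvTb_neg_one (k : Nat) : pvTb (-1) k = true := by
  have : (-1 : Int) = -(0:Nat) - 1 := by norm_num
  rw [this, pvTb_negSucc]; simp

theorem pvTb_band (a b : Int) (k : Nat) :
    pvTb (PySem.Int.band a b) k = (pvTb a k && pvTb b k) := by
  unfold PySem.Int.band
  split_ifs with ha hb hb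
  · rw [pvTb_ofNat, pvTb_pos a ha, pvTb_pos b hb, Nat.testBit_and]
  · rw [pvTb_pos a ha, pvTb_neg b hb, pv_sub_and_eq_xor, pvTb_ofNat,
      Nat.testBit_xor, Nat.testBit_and]
    cases a.toNat.testBit k <;> cases ((-b - 1).toNat).testBit k <;> rfl
  · rw [pvTb_neg a ha, pvTb_pos b hb, pv_sub_and_eq_xor, pvTb_ofNat,
      Nat.testBit_xor, Nat.testBit_and]
    cases b.toNat.testBit k <;> cases ((-a - 1).toNat).testBit k <;> rfl
  · rw [pvTb_neg a ha, pvTb_neg b hb, pvTb_negSucc, Nat.testBit_or]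
    cases ((-a - 1).toNat).testBit k <;> cases ((-b - 1).toNat).testBit k <;> rfl

theorem pvTb_bor (a b : Int) (k : Nat) :
    pvTb (PySem.Int.bor a b) k = (pvTb a k || pvTb b k) := by
  unfold PySem.Int.bor
  split_ifs with ha hb hb
  · rw [pvTb_ofNat, pvTb_pos a ha, pvTb_pos b hb, Nat.testBit_or]
  · rw [pvTb_pos a ha, pvTb_neg b hb, pv_sub_and_eq_xor, pvTb_negSucc,
      Nat.testBit_xor, Nat.testBit_and]
    cases a.toNat.testBit k <;> cases ((-b - 1).toNat).testBit k <;> rfl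
  · rw [pvTb_neg a ha, pvTb_pos b hb, pv_sub_and_eq_xor, pvTb_negSucc,
      Nat.testBit_xor, Nat.testBit_and]
    cases b.toNat.testBit k <;> cases ((-a - 1).toNat).testBit k <;> rfl
  · rw [pvTb_neg a ha, pvTb_neg b hb, pvTb_negSucc, Nat.testBit_and]
    cases ((-a - 1).toNat).testBit k <;> cases ((-b - 1).toNat).testBit k <;> rfl

theorem pvTb_bxor (a b : Int) (k : Nat) :
    pvTb (PySem.Int.bxor a b) k = (pvTb a k ^^ pvTb b k) := by
  unfold PySem.Int.bxor
  split_ifs with ha hb hb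
  · rw [pvTb_ofNat, pvTb_pos a ha, pvTb_pos b hb, Nat.testBit_xor]
  · rw [pvTb_pos a ha, pvTb_neg b hb, pvTb_negSucc, Nat.testBit_xor]
    cases a.toNat.testBit k <;> cases ((-b - 1).toNat).testBit k <;> rfl
  · rw [pvTb_neg a ha, pvTb_pos b hb, pvTb_negSucc, Nat.testBit_xor]
    cases b.toNat.testBit k <;> cases ((-a - 1).toNat).testBit k <;> rfl
  · rw [pvTb_neg a ha, pvTb_neg b hb, pvTb_ofNat, Nat.testBit_xor]
    cases ((-a - 1).toNat).testBit k <;> cases ((-b - 1).toNat).testBit k <;> rfl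

theorem pv_not_eq (a : Int) : Int.not a = -a - 1 := by
  cases a with
  | ofNat n => show Int.negSucc n = _; simp [Int.negSucc_eq]; ring
  | negSucc n => show Int.ofNat n = _; simp [Int.negSucc_eq]

theorem pvTb_not (a : Int) (k : Nat) : pvTb (Int.not a) k = !(pvTb a k) := by
  rw [pv_not_eq]
  by_cases ha : 0 ≤ a
  · have h1 : ¬((0:Int) ≤ -a - 1) := by omega
    rw [pvTb_neg _ h1, pvTb_pos a ha]
    have : (-(-a - 1) - 1).toNat = a.toNat := by omega
    rw [this]
  · have h1 : (0:Int) ≤ -a - 1 := by omega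
    rw [pvTb_pos _ h1, pvTb_neg a ha]
    simp

theorem pvTb_sel (x y m : Int) (k : Nat) :
    pvTb (pvSel x y m) k = (if pvTb m k then pvTb y k else pvTb x k) := by
  unfold pvSel
  simp only [pvTb_bor, pvTb_band, pvTb_not]
  cases pvTb m k <;> simp

theorem pvTb_ext {a b : Int} (h : ∀ k, pvTb a k = pvTb b k) : a = b := by
  have big : ∀ (x d : Nat), x.testBit (x + d) = false := fun x d =>
    Nat.testBit_lt_two_pow (lt_of_lt_of_le Nat.lt_two_pow_self
      (Nat.pow_le_pow_right (by norm_num) (Nat.le_add_right x d)))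
  by_cases ha : 0 ≤ a <;> by_cases hb : 0 ≤ b
  · have : a.toNat = b.toNat := Nat.eq_of_testBit_eq fun k => by
      have hk := h k; rwa [pvTb_pos a ha, pvTb_pos b hb] at hk
    omega
  · exfalso
    have hk := h (a.toNat + (-b - 1).toNat)
    rw [pvTb_pos a ha, pvTb_neg b hb, big] at hk
    rw [Nat.add_comm, big] at hk
    simp at hk
  · exfalso
    have hk := h ((-a - 1).toNat + b.toNat)
    rw [pvTb_neg a ha, pvTb_pos b hb, big] at hk
    rw [Nat.add_comm, big] at hk
    simp at hk
  · have : (-a - 1).toNat = (-b - 1).toNat := Nat.eq_of_testBit_eq fun k => by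
      have hk := h k; rw [pvTb_neg a ha, pvTb_neg b hb] at hk
      exact Bool.not_inj hk
    omega

-- A's carry formula
def pvMaj (a b c : Int) : Int :=
  PySem.Int.bor (PySem.Int.band a b)
    (PySem.Int.bor (PySem.Int.band a c) (PySem.Int.band b c))

-- the multiplexer identities behind the carry-select adder
theorem pv_sel_comp (x y m0 m1 c : Int) :
    pvSel (pvSel x y m0) (pvSel x y m1) c = pvSel x y (pvSel m0 m1 c) := by
  apply pvTb_ext; intro k
  simp only [pvTb_sel]
  cases pvTb c k <;> rfl

theorem pv_sel_zero_neg_one (c : Int) : pvSel 0 (-1) c = c := by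
  apply pvTb_ext; intro k
  simp only [pvTb_sel, pvTb_zero, pvTb_neg_one]
  cases pvTb c k <;> rfl

theorem pv_maj_sel (a b c : Int) : pvMaj a b c = pvSel (pvMaj a b 0) (pvMaj a b (-1)) c := by
  apply pvTb_ext; intro k
  simp only [pvMaj, pvSel, pvTb_bor, pvTb_band, pvTb_not, pvTb_zero, pvTb_neg_one]
  cases pvTb a k <;> cases pvTb b k <;> cases pvTb c k <;> rfl

theorem pv_bxor_sel (x c : Int) :
    PySem.Int.bxor x c = pvSel (PySem.Int.bxor x 0) (PySem.Int.bxor x (-1)) c := by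
  apply pvTb_ext; intro k
  simp only [pvSel, pvTb_bor, pvTb_band, pvTb_not, pvTb_bxor, pvTb_zero, pvTb_neg_one]
  cases pvTb x k <;> cases pvTb c k <;> rfl

theorem pv_maj_zero (a b : Int) : pvMaj a b 0 = PySem.Int.band a b := by
  simp [pvMaj]

theorem pv_maj_neg_one (a b : Int) : pvMaj a b (-1) = PySem.Int.bor a b := by
  apply pvTb_ext; intro k
  simp only [pvMaj, pvTb_bor, pvTb_band, pvTb_neg_one]
  cases pvTb a k <;> cases pvTb b k <;> rfl

-- reference ripple-carry over a list of positions (A's loop body, symbolic carry-in)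
def pvRipC (A B : List Int) (c : Int) : List Nat → Int
  | [] => c
  | k :: ks => pvRipC A B (pvMaj (pvPad A k) (pvPad B k) c) ks

def pvRipR (A B : List Int) (c : Int) : List Nat → List Int
  | [] => []
  | k :: ks =>
    PySem.Int.bxor (PySem.Int.bxor (pvPad A k) (pvPad B k)) c ::
      pvRipR A B (pvMaj (pvPad A k) (pvPad B k) c) ks

theorem pvRipC_append (A B : List Int) (xs ys : List Nat) : ∀ c,
    pvRipC A B c (xs ++ ys) = pvRipC A B (pvRipC A B c xs) ys := by
  induction xs with
  | nil => intro c; rfl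
  | cons k xs ih => intro c; simp only [List.cons_append, pvRipC]; exact ih _

theorem pvRipR_append (A B : List Int) (xs ys : List Nat) : ∀ c,
    pvRipR A B c (xs ++ ys) = pvRipR A B c xs ++ pvRipR A B (pvRipC A B c xs) ys := by
  induction xs with
  | nil => intro c; rfl
  | cons k xs ih => intro c; simp only [List.cons_append, pvRipR, pvRipC, List.cons_append]; rw [ih]

-- the ripple carry-out for an arbitrary carry-in mask is the per-lane selection
-- between the carry-ins 0 and ~0
theorem pvRipC_sel (A B : List Int) (ks : List Nat) : ∀ c,
    pvRipC A B c ks = pvSel (pvRipC A B 0 ks) (pvRipC A B (-1) ks) c := by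
  induction ks with
  | nil => intro c; exact (pv_sel_zero_neg_one c).symm
  | cons k ks ih =>
    intro c
    simp only [pvRipC]
    rw [ih (pvMaj (pvPad A k) (pvPad B k) c), ih (pvMaj (pvPad A k) (pvPad B k) 0),
      ih (pvMaj (pvPad A k) (pvPad B k) (-1)), pv_sel_comp, ← pv_maj_sel]

theorem pv_zip_sel_comp (m0 m1 c : Int) : ∀ (xs ys : List Int),
    ((((xs.zip ys).map (fun xy => pvSel xy.1 xy.2 m0)).zip
      ((xs.zip ys).map (fun xy => pvSel xy.1 xy.2 m1))).map (fun xy => pvSel xy.1 xy.2 c))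
    = (xs.zip ys).map (fun xy => pvSel xy.1 xy.2 (pvSel m0 m1 c)) := by
  intro xs
  induction xs with
  | nil => intro ys; rfl
  | cons x xs ih =>
    intro ys
    cases ys with
    | nil => rfl
    | cons y ys =>
      simp only [List.zip_cons_cons, List.map_cons]
      rw [ih]
      simp [pv_sel_comp]

theorem pvRipR_sel (A B : List Int) (ks : List Nat) : ∀ c,
    pvRipR A B c ks = ((pvRipR A B 0 ks).zip (pvRipR A B (-1) ks)).map
      (fun xy => pvSel xy.1 xy.2 c) := by
  induction ks with
  | nil => intro c; rfl
  | cons k ks ih =>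
    intro c
    simp only [pvRipR, List.zip_cons_cons, List.map_cons]
    rw [ih (pvMaj (pvPad A k) (pvPad B k) c), ih (pvMaj (pvPad A k) (pvPad B k) 0),
      ih (pvMaj (pvPad A k) (pvPad B k) (-1)), pv_zip_sel_comp, ← pv_maj_sel, ← pv_bxor_sel]

-- B's divide-and-conquer adder computes the ripple results for carry-ins 0 and ~0
theorem pvAddRec_eq (A B : List Int) : ∀ (n lo : Nat),
    pvAddRec A B lo n =
      (pvRipR A B 0 (List.range' lo n), pvRipC A B 0 (List.range' lo n),
       pvRipR A B (-1) (List.range' lo n), pvRipC A B (-1) (List.range' lo n)) := by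
  intro n
  induction n using Nat.strong_induction_on with
  | _ n ih =>
    intro lo
    by_cases h0 : n = 0
    · subst h0; rw [pvAddRec.eq_def]; simp [pvRipR, pvRipC]
    · by_cases h1 : n = 1
      · subst h1
        rw [pvAddRec.eq_def]
        simp only [if_neg (by omega : ¬(1 = 0)), if_true]
        have e0 : List.range' lo 1 = [lo] := by simp
        rw [e0]
        simp only [pvRipR, pvRipC, pv_maj_zero, pv_maj_neg_one, PySem.Int.bxor_zero]
      · have hsplit : List.range' lo n = List.range' lo (n / 2) ++ List.range' (lo + n / 2) (n - n / 2) := by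
          have := @List.range'_append lo (n / 2) (n - n / 2) 1
          simp only [one_mul] at this
          rw [this]
          congr 1
          omega
        rw [pvAddRec.eq_def]
        rw [if_neg h0, if_neg h1,
          ih (n / 2) (by omega) lo, ih (n - n / 2) (by omega) (lo + n / 2)]
        simp only [hsplit, pvRipR_append, pvRipC_append, Prod.mk.injEq]
        refine ⟨?_, ?_, ?_, ?_⟩
        · rw [pvRipR_sel A B (List.range' (lo + n / 2) (n - n / 2)) (pvRipC A B 0 (List.range' lo (n / 2)))]
        · rw [pvRipC_sel A B (List.range' (lo + n / 2) (n - n / 2)) (pvRipC A B 0 (List.range' lo (n / 2)))]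
        · rw [pvRipR_sel A B (List.range' (lo + n / 2) (n - n / 2)) (pvRipC A B (-1) (List.range' lo (n / 2)))]
        · rw [pvRipC_sel A B (List.range' (lo + n / 2) (n - n / 2)) (pvRipC A B (-1) (List.range' lo (n / 2)))]

-- ===== A-side loop characterisation =====

def pvStepA (A B : List Int) (st : Int × List Int) (k : Int) : Int × List Int :=
  (PySem.Int.bor (PySem.Int.band (pvPad A k) (pvPad B k))
    (PySem.Int.bor (PySem.Int.band (pvPad A k) st.1) (PySem.Int.band (pvPad B k) st.1)),
   st.2.set k.toNat (PySem.Int.bxor (PySem.Int.bxor (pvPad A k) (pvPad B k)) st.1))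

theorem portA_eq (A B : List Int) (bits : Int) :
    add_slices_py A B bits =
      ((PySem.List.pyRange 0 bits 1).foldl (pvStepA A B) (0, List.replicate bits.toNat 0)).2 := rfl

def pvCarA (A B : List Int) : Nat → Int
  | 0 => 0
  | n + 1 => pvMaj (pvPad A n) (pvPad B n) (pvCarA A B n)

def pvOut (A B : List Int) (n : Nat) : Int :=
  PySem.Int.bxor (PySem.Int.bxor (pvPad A n) (pvPad B n)) (pvCarA A B n)

theorem pvA_loop (A B : List Int) (n : Nat) : ∀ j, j ≤ n →
    (PySem.List.pyRange 0 (j : Int) 1).foldl (pvStepA A B) (0, List.replicate n 0)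
    = (pvCarA A B j, (List.range n).map (fun i => if i < j then pvOut A B i else 0)) := by
  intro j
  induction j with
  | zero =>
    intro _
    rw [PySem.List.pyRange_one_eq_nil (by norm_num)]
    simp [pvCarA]
  | succ j ih =>
    intro hj
    have hcast : ((j + 1 : Nat) : Int) = (j : Int) + 1 := by push_cast; ring
    rw [hcast, PySem.List.pyRange_one_succ_right (by positivity), List.foldl_append,
      ih (by omega)]
    simp only [List.foldl_cons, List.foldl_nil, pvStepA]
    simp only [Prod.mk.injEq]
    constructor
    · simp [pvCarA, pvMaj]
    · rw [Int.toNat_natCast]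
      apply List.ext_getElem
      · simp
      · intro i h1 h2
        have h3 : i < n := by simpa using h2
        simp only [List.getElem_set, List.getElem_map, List.getElem_range]
        by_cases hij : j = i
        · subst hij
          rw [if_pos rfl, if_pos (by omega)]
          rfl
        · rw [if_neg hij]
          split_ifs with h4 h5 <;> first | rfl | omega

-- the ripple reference from position 0 with carry-in 0 is A's carry / output sequence
theorem pvRip_range (A B : List Int) : ∀ n : Nat,
    pvRipC A B 0 (List.range' 0 n) = pvCarA A B n ∧
    pvRipR A B 0 (List.range' 0 n) = (List.range n).map (pvOut A B) := by
  intro n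
  induction n with
  | zero => exact ⟨rfl, rfl⟩
  | succ n ih =>
    have hconc : List.range' 0 (n + 1) = List.range' 0 n ++ [n] := by
      rw [List.range'_concat]; simp
    constructor
    · rw [hconc, pvRipC_append, ih.1]
      simp [pvRipC, pvCarA]
    · rw [hconc, pvRipR_append, ih.1, ih.2, List.range_succ, List.map_append]
      simp [pvRipR, pvOut]

theorem pv_final (A B : List Int) (bits : Int) :
    add_slices_py A B bits = add_slices_py_alt A B bits := by
  rw [portA_eq]
  unfold add_slices_py_alt
  rw [pvAddRec_eq]
  have hmax : (max bits 0).toNat = bits.toNat := by omega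
  rw [hmax]
  by_cases hb : 0 < bits
  · have hbits : bits = ((bits.toNat : Nat) : Int) := by omega
    rw [hbits, Int.toNat_natCast,
      pvA_loop A B bits.toNat bits.toNat (le_refl _)]
    simp only [(pvRip_range A B bits.toNat).2]
    apply List.map_congr_left
    intro i hi
    rw [if_pos (List.mem_range.mp hi)]
  · have h0 : bits.toNat = 0 := by omega
    rw [PySem.List.pyRange_one_eq_nil (by omega), h0]
    rfl

-- ===== VERDICT (by name: the statement is the Claim_ definition above) =====
theorem add_slices_py_spec : Claim_equal_add_slices_py := by
  intro A B bits _
  show add_slices_py A B bits = add_slices_py_alt A B bits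
  exact pv_final A B bits
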